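-- pv_equiv track=rewrite | github.com/argriffing/xgcode | 20100528a.py | gen_clumped_lines
-- ===== SOURCE A (Python) =====
-- def gen_clumped_lines(lines):
--     """
--     Yield clumps of contiguous lines with no intervening blank lines.
--     Also comment lines are removed.
--     @param lines: raw lines
--     """
--     clump = []
--     for line in lines:
--         line = line.strip()
--         if line.startswith('#'):
--             continue
--         if line:
--             clump.append(line)
--         elif clump:
--             yield clump
--             clump = []
--     if clump:
--         yield clump
-- ===== SOURCE B (Python) =====
-- def gen_clumped_lines(lines):
--     """
--     Yield clumps of contiguous lines with no intervening blank lines.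
--     Also comment lines are removed.
--     @param lines: raw lines
--     """
--     stream = [s for s in (line.strip() for line in lines)
--               if not s.startswith('#')]
--     n = len(stream)
--     i = 0
--     while i < n:
--         if stream[i]:
--             j = i
--             while j < n and stream[j]:
--                 j += 1
--             yield stream[i:j]
--             i = j
--         else:
--             i += 1
-- ===== Notes on version B (the rewrite author's own statement) =====
-- stated objective: alternative
-- what changed: B first materializes the stripped, comment-filtered stream as a list, then extracts each clump in one index-based scan that slices out a whole non-blank run, instead of A's single loop that accumulates a clump element by element and flushes it on blanks.
import Mathlib
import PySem

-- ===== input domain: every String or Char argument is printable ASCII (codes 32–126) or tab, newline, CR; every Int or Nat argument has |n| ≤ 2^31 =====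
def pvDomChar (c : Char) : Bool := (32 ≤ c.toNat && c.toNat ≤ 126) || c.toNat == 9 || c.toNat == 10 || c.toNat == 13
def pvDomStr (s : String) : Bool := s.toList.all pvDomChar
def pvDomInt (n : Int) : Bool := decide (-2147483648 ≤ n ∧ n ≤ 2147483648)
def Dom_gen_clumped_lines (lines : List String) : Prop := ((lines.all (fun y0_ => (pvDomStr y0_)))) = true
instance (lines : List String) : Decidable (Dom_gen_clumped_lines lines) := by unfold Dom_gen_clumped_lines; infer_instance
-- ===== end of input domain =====

-- B builds the stripped, comment-filtered stream first and then slices out whole non-blank runs by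
-- index scanning, instead of A's single accumulating loop; alternative decomposition, same cost.

-- ===== PORT A =====
-- literal transliteration of A's accumulating loop (the generator's yields collected in order)
def gen_clumped_lines (lines : List String) : List (List String) :=
  let st := lines.foldl (fun (acc : List String × List (List String)) line =>
    let line := PySem.Str.strip line
    if PySem.Str.startswith line "#" then acc
    else if line ≠ "" then (acc.1 ++ [line], acc.2)
    else if acc.1 ≠ [] then ([], acc.2 ++ [acc.1])
    else acc) ([], [])
  if st.1 ≠ [] then st.2 ++ [st.1] else st.2

-- ===== PORT B =====
-- inner `while j < n and stream[j]:` of Source B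
def bScan (stream : List String) (n j : Nat) : Nat :=
  if j < n ∧ stream.getD j "" ≠ "" then bScan stream n (j + 1) else j
termination_by n - j
decreasing_by omega

-- needed by bLoop's termination proof
theorem le_bScan (stream : List String) (n : Nat) (j : Nat) : j ≤ bScan stream n j := by
  have key : ∀ k j, n - j ≤ k → j ≤ bScan stream n j := by
    intro k
    induction k with
    | zero =>
      intro j hj
      rw [bScan]
      split
      · omega
      · exact Nat.le_refl j
    | succ k ih =>
      intro j hj
      rw [bScan]
      split
      · have := ih (j + 1) (by omega)
        omega
      · exact Nat.le_refl j
  exact key (n - j) j (Nat.le_refl _)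

-- outer `while i < n:` of Source B (yields collected in order)
def bLoop (stream : List String) (n i : Nat) (out : List (List String)) : List (List String) :=
  if _h : i < n then
    if _h2 : stream.getD i "" ≠ "" then
      bLoop stream n (bScan stream n i)
        (out ++ [PySem.List.slice stream (some (i : Int)) (some ((bScan stream n i : Nat) : Int))])
    else bLoop stream n (i + 1) out
  else out
termination_by n - i
decreasing_by
  · have h1 : bScan stream n i = bScan stream n (i + 1) := by
      rw [bScan]; rw [if_pos ⟨_h, _h2⟩]
    have h2 := le_bScan stream n (i + 1)
    omega
  · omega

def gen_clumped_lines_alt (lines : List String) : List (List String) :=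
  let stream := (lines.map PySem.Str.strip).filter (fun s => !PySem.Str.startswith s "#")
  bLoop stream stream.length 0 []

-- ===== PRECONDITION & SPEC =====
def Spec_gen_clumped_lines (lines : List String) (out : List (List String)) : Prop := out = gen_clumped_lines_alt lines
instance (lines : List String) (out : List (List String)) : Decidable (Spec_gen_clumped_lines lines out) := by unfold Spec_gen_clumped_lines; infer_instance

-- ===== CLAIM (what is proved, stated in full; the proofs are below) =====
def Claim_equal_gen_clumped_lines : Prop := ∀ (lines : List String), Dom_gen_clumped_lines lines → Spec_gen_clumped_lines lines (gen_clumped_lines lines)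

-- ===== LEMMAS AND PROOFS =====

-- Bool "non-blank" predicate
def pvNb (s : String) : Bool := !(s == "")

-- reference clump decomposition: maximal non-blank runs of the stream
def pvGrp : List String → List (List String)
  | [] => []
  | s :: r =>
    if s = "" then pvGrp r
    else (s :: r.takeWhile pvNb) :: pvGrp (r.dropWhile pvNb)
termination_by l => l.length
decreasing_by
  · simp
  · have := List.length_dropWhile_le (p := pvNb) (l := r)
    simp only [List.length_cons]; omega

-- A's loop body with strip/comment filtering already applied
def pvStep (acc : List String × List (List String)) (s : String) : List String × List (List String) :=
  if s ≠ "" then (acc.1 ++ [s], acc.2)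
  else if acc.1 ≠ [] then ([], acc.2 ++ [acc.1])
  else acc

-- tail of A's loop on the remaining stream, given the pending clump c
def pvClumpsAux (c : List String) : List String → List (List String)
  | [] => if c = [] then [] else [c]
  | s :: r =>
    if s ≠ "" then pvClumpsAux (c ++ [s]) r
    else if c ≠ [] then c :: pvClumpsAux [] r
    else pvClumpsAux [] r

theorem foldA_eq_fold_stream (lines : List String) : ∀ acc : List String × List (List String),
    lines.foldl (fun acc line =>
      let line := PySem.Str.strip line
      if PySem.Str.startswith line "#" then acc
      else if line ≠ "" then (acc.1 ++ [line], acc.2)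
      else if acc.1 ≠ [] then ([], acc.2 ++ [acc.1])
      else acc) acc
    = ((lines.map PySem.Str.strip).filter (fun s => !PySem.Str.startswith s "#")).foldl pvStep acc := by
  induction lines with
  | nil => intro acc; simp
  | cons l ls ih =>
    intro acc
    simp only [List.foldl_cons, List.map_cons, List.filter_cons]
    by_cases h : PySem.Str.startswith (PySem.Str.strip l) "#"
    · simp only [h, if_pos, Bool.not_true, Bool.false_eq_true, if_false]
      rw [ih]
    · simp only [h, Bool.not_false, if_true, Bool.false_eq_true, if_false, List.foldl_cons]
      rw [ih]
      rfl

theorem fold_eq_clumpsAux (stream : List String) : ∀ (c : List String) (out : List (List String)),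
    (let st := stream.foldl pvStep (c, out)
     if st.1 ≠ [] then st.2 ++ [st.1] else st.2) = out ++ pvClumpsAux c stream := by
  induction stream with
  | nil =>
    intro c out
    simp only [List.foldl_nil, pvClumpsAux]
    split_ifs <;> simp_all
  | cons s r ih =>
    intro c out
    simp only [List.foldl_cons, pvClumpsAux, pvStep]
    by_cases hs : s ≠ ""
    · rw [if_pos hs, if_pos hs]
      exact ih (c ++ [s]) out
    · rw [if_neg hs, if_neg hs]
      by_cases hc : c ≠ []
      · rw [if_pos hc, if_pos hc]
        rw [ih [] (out ++ [c])]
        simp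
      · rw [if_neg hc, if_neg hc]
        have hc' : c = [] := not_not.mp hc
        subst hc'
        exact ih [] out

theorem take_len_takeWhile {α : Type} (p : α → Bool) (l : List α) :
    l.take (l.takeWhile p).length = l.takeWhile p := by
  induction l with
  | nil => simp
  | cons a l ih =>
    by_cases h : p a <;> simp [h, ih]

theorem drop_len_takeWhile {α : Type} (p : α → Bool) (l : List α) :
    l.drop (l.takeWhile p).length = l.dropWhile p := by
  induction l with
  | nil => simp
  | cons a l ih =>
    by_cases h : p a <;> simp [h, ih]

theorem clumpsAux_eq_grp (stream : List String) :
    (∀ c, c ≠ [] → pvClumpsAux c stream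
        = (c ++ stream.takeWhile pvNb) :: pvGrp (stream.dropWhile pvNb))
    ∧ pvClumpsAux [] stream = pvGrp stream := by
  have key : ∀ n (stream : List String), stream.length ≤ n →
      (∀ c, c ≠ [] → pvClumpsAux c stream
          = (c ++ stream.takeWhile pvNb) :: pvGrp (stream.dropWhile pvNb))
      ∧ pvClumpsAux [] stream = pvGrp stream := by
    intro n
    induction n with
    | zero =>
      intro stream hlen
      have hnil : stream = [] := by
        cases stream with
        | nil => rfl
        | cons a l => simp at hlen
      subst hnil
      refine ⟨fun c hc => ?_, by simp [pvClumpsAux, pvGrp]⟩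
      simp [pvClumpsAux, pvGrp, hc]
    | succ n ih =>
      intro stream hlen
      cases stream with
      | nil =>
        refine ⟨fun c hc => ?_, by simp [pvClumpsAux, pvGrp]⟩
        simp [pvClumpsAux, pvGrp, hc]
      | cons s r =>
        have hr : r.length ≤ n := by simp at hlen; omega
        constructor
        · intro c hc
          by_cases hs : s = ""
          · subst hs
            simp only [pvClumpsAux]
            rw [if_neg (by simp), if_pos hc, (ih r hr).2]
            simp [pvGrp, pvNb]
          · simp only [pvClumpsAux, if_pos hs]
            rw [(ih r hr).1 (c ++ [s]) (by simp)]
            simp [pvNb, hs]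
        · by_cases hs : s = ""
          · subst hs
            simp only [pvClumpsAux]
            rw [if_neg (by simp), if_neg (by simp), (ih r hr).2]
            simp [pvGrp]
          · simp only [pvClumpsAux, if_pos hs]
            rw [List.nil_append, (ih r hr).1 [s] (by simp)]
            simp [pvGrp, hs]
  exact key stream.length stream (Nat.le_refl _)

theorem bScan_spec (stream : List String) : ∀ j, j ≤ stream.length →
    bScan stream stream.length j = j + ((stream.drop j).takeWhile pvNb).length := by
  have key : ∀ k j, stream.length - j ≤ k → j ≤ stream.length →
      bScan stream stream.length j = j + ((stream.drop j).takeWhile pvNb).length := by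
    intro k
    induction k with
    | zero =>
      intro j hk hj
      have hj' : j = stream.length := by omega
      rw [bScan]
      rw [if_neg (by omega)]
      rw [List.drop_eq_nil_of_le (by omega)]
      simp
    | succ k ih =>
      intro j hk hj
      rw [bScan]
      by_cases hlt : j < stream.length
      · have hdrop : stream.drop j = stream[j] :: stream.drop (j + 1) :=
          List.drop_eq_getElem_cons hlt
        have hgetD : stream.getD j "" = stream[j] := stream.getD_eq_getElem "" hlt
        by_cases hne : stream.getD j "" ≠ ""
        · rw [if_pos ⟨hlt, hne⟩]
          rw [ih (j + 1) (by omega) (by omega)]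
          rw [hdrop, List.takeWhile_cons]
          have : pvNb stream[j] = true := by
            simp [pvNb]; rw [hgetD] at hne; exact hne
          rw [this]
          simp only [if_true, List.length_cons]
          omega
        · rw [if_neg (by tauto)]
          rw [hdrop, List.takeWhile_cons]
          have : pvNb stream[j] = false := by
            simp only [ne_eq, not_not] at hne
            simp [pvNb]; rw [← hgetD, hne]
          rw [this]
          simp
      · rw [if_neg (by omega)]
        rw [List.drop_eq_nil_of_le (by omega)]
        simp
  exact fun j hj => key (stream.length - j) j (Nat.le_refl _) hj

theorem bLoop_spec (stream : List String) : ∀ i out, i ≤ stream.length →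
    bLoop stream stream.length i out = out ++ pvGrp (stream.drop i) := by
  have key : ∀ k i out, stream.length - i ≤ k → i ≤ stream.length →
      bLoop stream stream.length i out = out ++ pvGrp (stream.drop i) := by
    intro k
    induction k with
    | zero =>
      intro i out hk hi
      rw [bLoop, dif_neg (by omega), List.drop_eq_nil_of_le (by omega)]
      simp [pvGrp]
    | succ k ih =>
      intro i out hk hi
      rw [bLoop]
      by_cases hlt : i < stream.length
      · rw [dif_pos hlt]
        have hdrop : stream.drop i = stream[i] :: stream.drop (i + 1) :=
          List.drop_eq_getElem_cons hlt
        have hgetD : stream.getD i "" = stream[i] := stream.getD_eq_getElem "" hlt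
        by_cases hne : stream.getD i "" ≠ ""
        · rw [dif_pos hne]
          have hsne : stream[i] ≠ "" := by rw [← hgetD]; exact hne
          have hnb : pvNb stream[i] = true := by simp [pvNb, hsne]
          have hscan : bScan stream stream.length i
              = i + ((stream.drop i).takeWhile pvNb).length := bScan_spec stream i hi
          have htw : (stream.drop i).takeWhile pvNb
              = stream[i] :: (stream.drop (i + 1)).takeWhile pvNb := by
            rw [hdrop, List.takeWhile_cons, hnb]
            simp
          have hT1 : 1 ≤ ((stream.drop i).takeWhile pvNb).length := by
            rw [htw]; simp
          have hTle : ((stream.drop i).takeWhile pvNb).length ≤ stream.length - i := by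
            have h1 := (List.takeWhile_prefix (p := pvNb) (l := stream.drop i)).length_le
            have h2 : (stream.drop i).length = stream.length - i := List.length_drop ..
            omega
          set T := ((stream.drop i).takeWhile pvNb).length with hTdef
          have hslice : PySem.List.slice stream (some (i : Int))
              (some ((bScan stream stream.length i : Nat) : Int))
              = (stream.drop i).takeWhile pvNb := by
            rw [hscan, PySem.List.slice_natCast]
            have h2 : i + T - i = T := by omega
            rw [h2, hTdef]
            exact take_len_takeWhile pvNb (stream.drop i)
          have hdropj : stream.drop (bScan stream stream.length i)
              = (stream.drop i).dropWhile pvNb := by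
            rw [hscan, ← drop_len_takeWhile pvNb (stream.drop i), List.drop_drop, ← hTdef]
          rw [ih (bScan stream stream.length i) (out ++ [PySem.List.slice stream (some (i : Int))
              (some ((bScan stream stream.length i : Nat) : Int))]) (by omega) (by omega)]
          rw [hslice, hdropj, htw]
          conv_rhs => rw [hdrop]
          rw [pvGrp]
          rw [if_neg hsne]
          have hdw : (stream.drop i).dropWhile pvNb
              = (stream.drop (i + 1)).dropWhile pvNb := by
            rw [hdrop, List.dropWhile_cons, hnb]
            simp
          rw [hdw]
          simp
        · rw [dif_neg hne]
          simp only [ne_eq, not_not] at hne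
          have hsb : stream[i] = "" := by rw [← hgetD, hne]
          rw [ih (i + 1) out (by omega) (by omega)]
          conv_rhs => rw [hdrop]
          rw [pvGrp, if_pos hsb]
      · rw [dif_neg hlt, List.drop_eq_nil_of_le (by omega)]
        simp [pvGrp]
  exact fun i out hi => key (stream.length - i) i out (Nat.le_refl _) hi

-- ===== VERDICT (by name: the statement is the Claim_ definition above) =====
theorem gen_clumped_lines_spec : Claim_equal_gen_clumped_lines := by
  intro lines _
  unfold Spec_gen_clumped_lines gen_clumped_lines gen_clumped_lines_alt
  rw [foldA_eq_fold_stream]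
  rw [fold_eq_clumpsAux]
  rw [(clumpsAux_eq_grp _).2]
  rw [bLoop_spec _ 0 [] (by omega)]
  simp
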